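-- pv_equiv track=rewrite | github.com/warrentdrew/bevf8a | projects/nuscenes/eval/detection/evaluate.py | get_eval_distance
-- ===== SOURCE A (Python) =====
-- def get_eval_distance(distances):
--     """
--     input:
--         self.cfg.distances = [0,50,20]
--     return:
--         eval_distance = [[0, 20], [20, 40], [40, 50], [0, 50]]
--     """
--     start_dis, end_dis, inter =  distances[:]
--     start_tmp = start_dis
--     eval_distance = []
--     num_interval = (end_dis - start_dis) // inter if (end_dis - start_dis) % inter == 0 else (end_dis - start_dis) // inter + 1
--     for i in range(num_interval):
--         if start_dis + inter <= end_dis: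
--             eval_distance.append([start_dis, start_dis + inter])
--             start_dis += inter
--         else:
--             eval_distance.append([start_dis, end_dis])
--     eval_distance.append([start_tmp, end_dis])
--     return eval_distance
-- ===== SOURCE B (Python) =====
-- def get_eval_distance(distances):
--     start_dis, end_dis, inter = distances[:]
--     diff = end_dis - start_dis
--     num_interval = diff // inter if diff % inter == 0 else diff // inter + 1
--     points = [start_dis + i * inter for i in range(num_interval)] + [end_dis]
--     eval_distance = [[points[i], points[i + 1]] for i in range(num_interval)]
--     eval_distance.append([start_dis, end_dis])
--     return eval_distance
-- ===== Notes on version B (the rewrite author's own statement) =====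
-- stated objective: alternative
-- what changed: B precomputes the list of breakpoints start+i*inter and pairs adjacent breakpoints, instead of A's stateful loop that conditionally advances start_dis and re-tests the bound each iteration.
-- intended difference: On inputs with inter < 0 and end < start (except inter = end-start), A returns degenerate intervals (the whole range repeated or an interval overshooting past end) left over from its loop, while B returns the intended descending partition into |inter|-sized pieces ending at end. — e.g. on get_eval_distance([0, -10, -5]): A returns [[0, -10], [0, -10], [0, -10]], B returns [[0, -5], [-5, -10], [0, -10]]
import Mathlib
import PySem

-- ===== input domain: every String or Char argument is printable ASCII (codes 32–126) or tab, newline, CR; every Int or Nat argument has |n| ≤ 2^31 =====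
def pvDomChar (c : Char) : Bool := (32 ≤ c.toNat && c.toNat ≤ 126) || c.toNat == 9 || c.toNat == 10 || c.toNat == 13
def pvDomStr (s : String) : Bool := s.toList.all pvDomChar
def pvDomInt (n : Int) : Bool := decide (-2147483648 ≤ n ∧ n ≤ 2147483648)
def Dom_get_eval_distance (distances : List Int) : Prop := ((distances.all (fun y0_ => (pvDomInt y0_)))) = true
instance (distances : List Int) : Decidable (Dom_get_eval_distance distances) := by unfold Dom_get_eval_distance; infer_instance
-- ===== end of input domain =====

-- B builds the interval list by pairing adjacent precomputed breakpoints instead of A's stateful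
-- advancing loop; on descending inputs (inter < 0, end < start) A returns degenerate intervals and
-- B the intended descending partition (see D_ below). Equivalence is about the return value only.

-- ===== PORT A =====
def get_eval_distance (distances : List Int) : List (List Int) :=
  match distances with
  | [start_dis, end_dis, inter] =>
    let start_tmp := start_dis
    let num_interval : Int :=
      if PySem.Int.mod (end_dis - start_dis) inter = 0 then
        PySem.Int.floordiv (end_dis - start_dis) inter
      else
        PySem.Int.floordiv (end_dis - start_dis) inter + 1
    let st :=
      (PySem.List.pyRange 0 num_interval 1).foldl
        (fun (st : Int × List (List Int)) _ =>
          if st.1 + inter ≤ end_dis then (st.1 + inter, st.2 ++ [[st.1, st.1 + inter]])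
          else (st.1, st.2 ++ [[st.1, end_dis]]))
        (start_dis, [])
    st.2 ++ [[start_tmp, end_dis]]
  | _ => []  -- unreachable under Pre_ (unpacking raises unless len = 3)

-- ===== PORT B =====
def get_eval_distance_alt (distances : List Int) : List (List Int) :=
  match distances with
  | [start_dis, end_dis, inter] =>
    let diff := end_dis - start_dis
    let num_interval : Int :=
      if PySem.Int.mod diff inter = 0 then PySem.Int.floordiv diff inter
      else PySem.Int.floordiv diff inter + 1
    let points :=
      (PySem.List.pyRange 0 num_interval 1).map (fun i => start_dis + i * inter) ++ [end_dis]
    let eval_distance :=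
      (PySem.List.pyRange 0 num_interval 1).map
        (fun i => [PySem.List.pyGetD points i 0, PySem.List.pyGetD points (i + 1) 0])
    eval_distance ++ [[start_dis, end_dis]]
  | [] => []  -- unreachable under Pre_ (unpacking raises unless len = 3)
  | [_] => []
  | [_, _] => []
  | _ :: _ :: _ :: _ :: _ => []

-- ===== PRECONDITION & SPEC =====
-- Pre_ excludes exactly the inputs where the Python A raises: lists whose length is not 3
-- (ValueError on unpacking) and inter = 0 (ZeroDivisionError).
def Pre_get_eval_distance (distances : List Int) : Prop :=
  distances.length = 3 ∧ distances.getD 2 0 ≠ 0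
instance (distances : List Int) : Decidable (Pre_get_eval_distance distances) := by
  unfold Pre_get_eval_distance; infer_instance

def pvWitness_get_eval_distance : List Int := [0, 50, 20]

-- On inputs with inter < 0 and end < start (except the exact one-step case inter = end - start),
-- A returns degenerate intervals (the whole range repeated, or an interval overshooting past end)
-- left over from its never/always-advancing loop, while B returns the intended descending
-- partition into |inter|-sized pieces.
def D_get_eval_distance (distances : List Int) : Prop :=
  distances.length = 3 ∧ distances.getD 2 0 < 0 ∧ distances.getD 1 0 < distances.getD 0 0 ∧
    distances.getD 2 0 ≠ distances.getD 1 0 - distances.getD 0 0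
instance (distances : List Int) : Decidable (D_get_eval_distance distances) := by
  unfold D_get_eval_distance; infer_instance

def Spec_get_eval_distance (distances : List Int) (out : List (List Int)) : Prop :=
  ¬ D_get_eval_distance distances → out = get_eval_distance_alt distances
instance (distances : List Int) (out : List (List Int)) : Decidable (Spec_get_eval_distance distances out) := by
  unfold Spec_get_eval_distance; infer_instance

def pvDiffWitness_get_eval_distance : List Int := [0, -10, -5]
def pvDiffWitnessOut_get_eval_distance : (List (List Int)) × (List (List Int)) :=
  ([[0, -10], [0, -10], [0, -10]], [[0, -5], [-5, -10], [0, -10]])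

-- ===== CLAIM (what is proved, stated in full; the proofs are below) =====
def Claim_unchanged_get_eval_distance : Prop := ∀ (distances : List Int), Dom_get_eval_distance distances → Pre_get_eval_distance distances → Spec_get_eval_distance distances (get_eval_distance distances)
def Claim_changed_get_eval_distance : Prop := Dom_get_eval_distance (pvDiffWitness_get_eval_distance) ∧ Pre_get_eval_distance (pvDiffWitness_get_eval_distance) ∧ D_get_eval_distance (pvDiffWitness_get_eval_distance) ∧ get_eval_distance (pvDiffWitness_get_eval_distance) = pvDiffWitnessOut_get_eval_distance.1 ∧ get_eval_distance_alt (pvDiffWitness_get_eval_distance) = pvDiffWitnessOut_get_eval_distance.2 ∧ pvDiffWitnessOut_get_eval_distance.1 ≠ pvDiffWitnessOut_get_eval_distance.2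

def Claim_exact_get_eval_distance : Prop := ∀ (distances : List Int), Dom_get_eval_distance distances → Pre_get_eval_distance distances → D_get_eval_distance distances → get_eval_distance distances ≠ get_eval_distance_alt distances

-- ===== LEMMAS AND PROOFS =====

-- the common value of both programs: n intervals [s+k·i, s+(k+1)·i], the last clipped to e
def pvSeg (e i : Int) (n : Nat) (s : Int) : List (List Int) :=
  (List.range n).map (fun k : Nat => [s + (k : Int) * i, if k + 1 = n then e else s + ((k : Int) + 1) * i])

lemma pvSeg_succ (e i : Int) (m : Nat) (hm : 1 ≤ m) (s : Int) :
    pvSeg e i (m + 1) s = [s, s + i] :: pvSeg e i m (s + i) := by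
  unfold pvSeg
  rw [List.range_succ_eq_map, List.map_cons, List.map_map]
  refine congrArg₂ _ ?_ (List.map_congr_left ?_)
  · simp; omega
  · intro k _
    have h1 : ((k + 1 : Nat) : Int) = (k : Int) + 1 := by push_cast; ring
    simp only [Function.comp_apply, Nat.succ_eq_add_one, h1]
    have h2 : (k + 1) + 1 = m + 1 ↔ k + 1 = m := by omega
    rw [if_congr h2 rfl rfl]
    ring_nf

lemma pvLoopA (e i : Int) : ∀ (n : Nat) (s : Int) (acc : List (List Int)),
    (∀ k : Nat, k + 1 < n → s + ((k : Int) + 1) * i ≤ e) →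
    (s + (n : Int) * i ≤ e → s + (n : Int) * i = e) →
    ((PySem.List.pyRange 0 (n : Int) 1).foldl
      (fun (st : Int × List (List Int)) _ =>
        if st.1 + i ≤ e then (st.1 + i, st.2 ++ [[st.1, st.1 + i]])
        else (st.1, st.2 ++ [[st.1, e]]))
      (s, acc)).2 = acc ++ pvSeg e i n s := by
  intro n
  induction n with
  | zero => intro s acc _ _; simp [pvSeg]
  | succ m ih =>
    intro s acc h1 h2
    rw [PySem.List.pyRange_zero_natCast, List.range_succ_eq_map]
    simp only [List.map_cons, List.foldl_cons, List.map_map, List.foldl_map]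
    by_cases hm : m = 0
    · subst hm
      simp only [List.range_zero, List.foldl_nil]
      by_cases hc : s + i ≤ e
      · have he : s + i = e := by have := h2 (by push_cast; linarith); push_cast at this; linarith
        simp [pvSeg, he]
      · simp [hc, pvSeg]
    · have hm1 : 1 ≤ m := Nat.one_le_iff_ne_zero.mpr hm
      have hc : s + i ≤ e := by
        have := h1 0 (by omega); simpa using this
      have hih := ih (s + i) (acc ++ [[s, s + i]])
        (by intro k hk
            have := h1 (k + 1) (by omega)
            push_cast at this ⊢; linarith)
        (by intro h
            have := h2 (by push_cast at h ⊢; linarith)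
            push_cast at this ⊢; linarith)
      rw [PySem.List.pyRange_zero_natCast] at hih
      simp only [List.foldl_map] at hih
      simp only [hc, if_pos]
      rw [hih, pvSeg_succ e i m hm1 s]
      simp

-- B's body, for a nonnegative interval count, equals pvSeg
lemma pvAltSeg (s e i : Int) (n : Nat) :
    ((PySem.List.pyRange 0 (n : Int) 1).map
      (fun k => [PySem.List.pyGetD ((PySem.List.pyRange 0 (n : Int) 1).map (fun j => s + j * i) ++ [e]) k 0,
                 PySem.List.pyGetD ((PySem.List.pyRange 0 (n : Int) 1).map (fun j => s + j * i) ++ [e]) (k + 1) 0]))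
    = pvSeg e i n s := by
  have hpts : (PySem.List.pyRange 0 (n : Int) 1).map (fun j => s + j * i) ++ [e]
      = (List.range (n + 1)).map (fun j : Nat => if j + 1 = n + 1 then e else s + (j : Int) * i) := by
    rw [PySem.List.pyRange_zero_natCast, List.map_map, List.range_succ, List.map_append]
    refine congrArg₂ _ (List.map_congr_left ?_) (by simp)
    intro k hk
    have hne : k ≠ n := by simp at hk; omega
    simp [hne]
  rw [hpts, PySem.List.pyRange_zero_natCast, List.map_map]
  unfold pvSeg
  refine List.map_congr_left ?_
  intro k hk
  have hkn : k < n := by simpa using hk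
  have hne : k ≠ n := by omega
  have g1 : PySem.List.pyGetD ((List.range (n + 1)).map (fun j : Nat => if j + 1 = n + 1 then e else s + (j : Int) * i)) (k : Int) 0
      = s + (k : Int) * i := by
    rw [PySem.List.pyGetD_natCast, List.getD_eq_getElem _ _ (by simpa using Nat.lt_succ_of_lt hkn)]
    simp [hne]
  have g2 : PySem.List.pyGetD ((List.range (n + 1)).map (fun j : Nat => if j + 1 = n + 1 then e else s + (j : Int) * i)) ((k : Int) + 1) 0
      = if k + 1 = n then e else s + ((k : Int) + 1) * i := by
    have hcast : ((k : Int) + 1) = ((k + 1 : Nat) : Int) := by push_cast; ring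
    rw [hcast, PySem.List.pyGetD_natCast, List.getD_eq_getElem _ _ (by simpa using Nat.succ_lt_succ hkn)]
    by_cases h : k + 1 = n <;> simp [h]
  simp only [Function.comp_apply, g1, g2]

-- arithmetic: both ports' interval count N = ceil((e-s)/i)
lemma pvNum_bounds_pos {s e i N : Int} (hi : 0 < i)
    (hN : N = (if PySem.Int.mod (e - s) i = 0 then PySem.Int.floordiv (e - s) i
               else PySem.Int.floordiv (e - s) i + 1)) :
    (N - 1) * i ≤ e - s ∧ e - s ≤ N * i := by
  have hfm := PySem.Int.floordiv_mul_add_mod (e - s) i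
  have hm0 := PySem.Int.mod_nonneg (e - s) hi
  have hml := PySem.Int.mod_lt (e - s) hi
  by_cases h : PySem.Int.mod (e - s) i = 0 <;> simp only [h, if_pos, if_false] at hN <;>
    constructor <;> nlinarith [hfm, hm0, hml]

lemma pvNum_nonpos_of_neg {s e i N : Int} (hi : i < 0) (hse : s ≤ e)
    (hN : N = (if PySem.Int.mod (e - s) i = 0 then PySem.Int.floordiv (e - s) i
               else PySem.Int.floordiv (e - s) i + 1)) :
    N ≤ 0 := by
  have hfm := PySem.Int.floordiv_mul_add_mod (e - s) i
  have hb := PySem.Int.mod_neg_bounds (e - s) hi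
  by_contra hc
  by_cases h : PySem.Int.mod (e - s) i = 0 <;> simp only [h, if_pos, if_false] at hN
  · have hfd0 : 1 ≤ PySem.Int.floordiv (e - s) i := by omega
    rw [h, add_zero] at hfm
    nlinarith [mul_pos (show (0:Int) < PySem.Int.floordiv (e - s) i by omega) (show (0:Int) < -i by omega)]
  · have hfd0 : 0 ≤ PySem.Int.floordiv (e - s) i := by omega
    have hr : PySem.Int.mod (e - s) i < 0 := lt_of_le_of_ne hb.2 h
    nlinarith [mul_nonneg hfd0 (show (0:Int) ≤ -i by omega)]

lemma pvRange_nil_of_nonpos {N : Int} (hN : N ≤ 0) : PySem.List.pyRange 0 N 1 = [] := by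
  by_cases h : N = 0
  · rw [h]; decide
  · simp [PySem.List.pyRange]; omega

lemma pvMain (s e i : Int) (hi : i ≠ 0)
    (hnd : ¬ (i < 0 ∧ e < s ∧ i ≠ e - s)) :
    get_eval_distance [s, e, i] = get_eval_distance_alt [s, e, i] := by
  simp only [get_eval_distance, get_eval_distance_alt]
  set N : Int := (if PySem.Int.mod (e - s) i = 0 then PySem.Int.floordiv (e - s) i
                  else PySem.Int.floordiv (e - s) i + 1) with hN
  by_cases hNp : N ≤ 0
  · rw [pvRange_nil_of_nonpos hNp]; simp
  · have hNp' : 0 < N := by omega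
    have hNn : N = ((N.toNat : Nat) : Int) := by omega
    rcases lt_or_gt_of_ne hi with hneg | hpos
    · -- i < 0: outside D_ this forces e < s and i = e - s, hence N = 1
      have hes : e < s := by
        by_contra hse
        exact absurd (pvNum_nonpos_of_neg hneg (by omega) hN) hNp
      have hieq : i = e - s := by
        by_contra hne
        exact hnd ⟨hneg, hes, hne⟩
      have hmod : PySem.Int.mod (e - s) i = 0 := by
        rw [PySem.Int.mod_eq_zero_iff_dvd, hieq]
      have hfm := PySem.Int.floordiv_mul_add_mod (e - s) i
      rw [hmod, add_zero] at hfm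
      have hz : (PySem.Int.floordiv (e - s) i - 1) * i = 0 := by linear_combination hfm - hieq
      have hfd : PySem.Int.floordiv (e - s) i = 1 := by
        rcases mul_eq_zero.mp hz with h | h
        · omega
        · exact absurd h hi
      have hN1 : N.toNat = 1 := by rw [hN, if_pos hmod, hfd] at hNn ⊢; rfl
      rw [hNn]
      rw [pvLoopA e i N.toNat s []
        (by intro k hk; omega)
        (by intro _; rw [hN1]; push_cast; omega),
        pvAltSeg s e i N.toNat]
      simp
    · -- i > 0
      have hb := pvNum_bounds_pos hpos hN
      rw [hNn]
      rw [pvLoopA e i N.toNat s []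
        (by intro k hk
            have hk' : ((k : Int) + 1) ≤ N - 1 := by omega
            have h1 : ((k : Int) + 1) * i ≤ (N - 1) * i :=
              mul_le_mul_of_nonneg_right hk' (le_of_lt hpos)
            linarith [hb.1])
        (by intro h
            rw [← hNn] at h ⊢
            linarith [hb.2]),
        pvAltSeg s e i N.toNat]
      simp

lemma pvLoopA_stuck (e i s : Int) (hc : ¬ s + i ≤ e) :
    ∀ {α : Type} (l : List α) (acc : List (List Int)),
    (l.foldl
      (fun (st : Int × List (List Int)) _ =>
        if st.1 + i ≤ e then (st.1 + i, st.2 ++ [[st.1, st.1 + i]])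
        else (st.1, st.2 ++ [[st.1, e]]))
      (s, acc)).2 = acc ++ List.replicate l.length [s, e] := by
  intro α l
  induction l with
  | nil => intro acc; simp
  | cons x t ih =>
    intro acc
    simp only [List.foldl_cons, hc, if_false, List.length_cons, List.replicate_succ]
    rw [ih (acc ++ [[s, e]])]
    simp

lemma pvTight (s e i : Int) (hi : i < 0) (hes : e < s) (hne : i ≠ e - s) :
    get_eval_distance [s, e, i] ≠ get_eval_distance_alt [s, e, i] := by
  simp only [get_eval_distance, get_eval_distance_alt]
  set N : Int := (if PySem.Int.mod (e - s) i = 0 then PySem.Int.floordiv (e - s) i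
                  else PySem.Int.floordiv (e - s) i + 1) with hN
  have hfm := PySem.Int.floordiv_mul_add_mod (e - s) i
  have hb := PySem.Int.mod_neg_bounds (e - s) hi
  rcases lt_or_gt_of_ne hne with hlt | hgt
  · -- i < e - s: exactly one loop step, which advances past s + i < e
    have hq0 : PySem.Int.floordiv (e - s) i = 0 := by
      by_contra hq
      rcases lt_or_gt_of_ne hq with h1 | h1
      · have h2 : (-1 : Int) * i ≤ PySem.Int.floordiv (e - s) i * i :=
          mul_le_mul_of_nonpos_right (by omega) (le_of_lt hi)
        linarith [hb.1, hb.2]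
      · have h2 : PySem.Int.floordiv (e - s) i * i ≤ 1 * i :=
          mul_le_mul_of_nonpos_right (by omega) (le_of_lt hi)
        linarith [hb.1, hb.2]
    have hmod : PySem.Int.mod (e - s) i = e - s := by rw [hq0] at hfm; linarith
    have hN1 : N = 1 := by rw [hN, if_neg (by omega), hq0]; ring
    have hr1 : PySem.List.pyRange 0 (1 : Int) 1 = [0] := by decide
    have hc : s + i ≤ e := by omega
    rw [hN1, hr1]
    simp only [List.foldl_cons, List.foldl_nil, hc, if_pos, List.map_cons, List.map_nil]
    intro h
    have h0 := congrArg List.head? h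
    simp [PySem.List.pyGetD] at h0
    omega
  · -- i > e - s: the loop never advances; A repeats [s, e], B's first interval is [s, s + i]
    have hq1 : 2 ≤ N := by
      by_cases h : PySem.Int.mod (e - s) i = 0
      · rw [hN, if_pos h]
        by_contra hq
        have h2 : (1 : Int) * i ≤ PySem.Int.floordiv (e - s) i * i :=
          mul_le_mul_of_nonpos_right (by omega) (le_of_lt hi)
        rw [h, add_zero] at hfm
        linarith
      · rw [hN, if_neg h]
        have h1 : 1 ≤ PySem.Int.floordiv (e - s) i := by
          by_contra hq
          have h2 : (0 : Int) * i ≤ PySem.Int.floordiv (e - s) i * i :=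
            mul_le_mul_of_nonpos_right (by omega) (le_of_lt hi)
          linarith [hb.1]
        omega
    have hNn : N = ((N.toNat : Nat) : Int) := by omega
    obtain ⟨m, hm⟩ : ∃ m, N.toNat = m + 2 := ⟨N.toNat - 2, by omega⟩
    have hsc : ¬ (s + i ≤ e) := by omega
    rw [hNn, pvAltSeg s e i N.toNat, hm, PySem.List.pyRange_zero_natCast,
      pvLoopA_stuck e i s hsc _ []]
    intro h
    have h0 := congrArg List.head? h
    simp [pvSeg, List.range_succ_eq_map, List.replicate_succ] at h0
    omega

-- ===== VERDICT (by name: the statement is the Claim_ definition above) =====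
theorem get_eval_distance_spec : Claim_unchanged_get_eval_distance := by
  intro distances _ hpre hnd
  obtain ⟨hlen, hi⟩ := hpre
  match distances with
  | [s, e, i] =>
    have hi' : i ≠ 0 := by simpa [List.getD] using hi
    refine pvMain s e i hi' ?_
    intro hd
    exact hnd ⟨by simp, by simpa [List.getD] using hd.1,
      by simpa [List.getD] using hd.2.1, by simpa [List.getD] using hd.2.2⟩

theorem get_eval_distance_changed : Claim_changed_get_eval_distance := by
  unfold Claim_changed_get_eval_distance; decide

theorem get_eval_distance_tight : Claim_exact_get_eval_distance := by
  intro distances _ hpre hd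
  match distances with
  | [s, e, i] =>
    exact pvTight s e i (by simpa [List.getD] using hd.2.1)
      (by simpa [List.getD] using hd.2.2.1) (by simpa [List.getD] using hd.2.2.2)
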